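-- pv_equiv track=rewrite | github.com/El-Banderas/RFM-TP3 | html_stuff.py | _more_than_one_AP_in_Channel
-- ===== SOURCE A (Python) =====
-- from collections import Counter
--
-- def _more_than_one_AP_in_Channel(used_channels):
-- 	freq_dict = Counter(used_channels)
-- 	more_than_one_AP = list(filter(lambda ele: freq_dict[ele] > 1, freq_dict))
-- 	more_than_one_AP.sort()
-- 	if len(more_than_one_AP) < 1:
-- 		return ""
-- 	result = "Channels shared with two or more AP's:<ul>"
-- 	more_than_one_AP.sort()
-- 	for elem in more_than_one_AP:
-- 		#result += _main_table_line(elem)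
-- 		result += f"<li>{elem}</li>"
-- 	result += " </ul>\n"
-- 	return result
-- ===== SOURCE B (Python) =====
-- def _more_than_one_AP_in_Channel(used_channels):
-- 	xs = sorted(used_channels)
-- 	more = []
-- 	i, n = 0, len(xs)
-- 	while i < n:
-- 		j = i + 1
-- 		while j < n and xs[j] == xs[i]:
-- 			j += 1
-- 		if j - i > 1:
-- 			more.append(xs[i])
-- 		i = j
-- 	if not more:
-- 		return ""
-- 	return ("Channels shared with two or more AP's:<ul>"
-- 		+ "".join(f"<li>{e}</li>" for e in more)
-- 		+ " </ul>\n")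
-- ===== Notes on version B (the rewrite author's own statement) =====
-- stated objective: alternative
-- what changed: Replaces the Counter hash-count-then-filter-then-sort pipeline with sort-the-whole-input-then-scan-adjacent-runs: duplicates are found as runs of length >= 2 in the sorted list, arriving already in sorted order, and the HTML items are joined once.
import Mathlib
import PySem

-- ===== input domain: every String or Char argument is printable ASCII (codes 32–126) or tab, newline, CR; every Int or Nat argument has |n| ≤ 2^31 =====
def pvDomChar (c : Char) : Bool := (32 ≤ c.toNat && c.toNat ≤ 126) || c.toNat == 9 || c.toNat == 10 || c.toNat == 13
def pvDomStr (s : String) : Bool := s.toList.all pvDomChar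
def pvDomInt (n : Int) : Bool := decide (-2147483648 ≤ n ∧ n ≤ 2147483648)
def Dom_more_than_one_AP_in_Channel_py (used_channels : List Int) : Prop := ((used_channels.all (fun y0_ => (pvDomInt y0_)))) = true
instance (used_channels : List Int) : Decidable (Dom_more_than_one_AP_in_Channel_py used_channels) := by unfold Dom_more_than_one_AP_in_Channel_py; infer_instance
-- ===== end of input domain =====

-- B replaces A's Counter/filter/sort pipeline by sorting the whole input and scanning adjacent runs; objective: alternative algorithm.


-- ===== PORT A =====
def more_than_one_AP_in_Channel_py (used_channels : List Int) : String :=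
  let freq_dict := PySem.Dict.counter used_channels
  let more_than_one_AP := (PySem.Dict.keys freq_dict).filter
    (fun ele => decide (1 < PySem.Dict.getD freq_dict ele 0))
  let more_than_one_AP := PySem.List.sorted more_than_one_AP (fun x => x) false
  if more_than_one_AP.length < 1 then ""
  else
    let result := "Channels shared with two or more AP's:<ul>"
    let more_than_one_AP := PySem.List.sorted more_than_one_AP (fun x => x) false
    let result := more_than_one_AP.foldl
      (fun acc elem => acc ++ ("<li>" ++ PySem.Int.toStr elem ++ "</li>")) result
    result ++ " </ul>\n"

-- ===== PORT B =====
-- B's outer while loop over the sorted list: each step consumes one run xs[i..j)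
-- (takeWhile/dropWhile = the inner 'while xs[j] == xs[i]' loop) and keeps the run's value when j - i > 1.
def pvDups : List Int → List Int
  | [] => []
  | a :: t =>
    let rest := t.dropWhile (fun x => x == a)
    if t.takeWhile (fun x => x == a) = [] then pvDups rest
    else a :: pvDups rest
termination_by l => l.length
decreasing_by
  all_goals
    simp only [List.length_cons]
    have := List.length_dropWhile_le (fun x => x == a) t
    omega

def more_than_one_AP_in_Channel_py_alt (used_channels : List Int) : String :=
  let xs := PySem.List.sorted used_channels (fun x => x) false
  let more := pvDups xs
  if more = [] then ""
  else
    "Channels shared with two or more AP's:<ul>"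
      ++ String.join (more.map (fun e => "<li>" ++ PySem.Int.toStr e ++ "</li>"))
      ++ " </ul>\n"

-- ===== PRECONDITION & SPEC =====
def Spec_more_than_one_AP_in_Channel_py (used_channels : List Int) (out : String) : Prop := out = more_than_one_AP_in_Channel_py_alt used_channels
instance (used_channels : List Int) (out : String) : Decidable (Spec_more_than_one_AP_in_Channel_py used_channels out) := by unfold Spec_more_than_one_AP_in_Channel_py; infer_instance

-- ===== CLAIM (what is proved, stated in full; the proofs are below) =====
def Claim_equal_more_than_one_AP_in_Channel_py : Prop := ∀ (used_channels : List Int), Dom_more_than_one_AP_in_Channel_py used_channels → Spec_more_than_one_AP_in_Channel_py used_channels (more_than_one_AP_in_Channel_py used_channels)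

-- ===== LEMMAS AND PROOFS =====

-- the head of a non-empty dropWhile fails the predicate
theorem pvDropWhile_head_not {p : Int → Bool} :
    ∀ (l : List Int) (c : Int) (r : List Int), l.dropWhile p = c :: r → p c = false := by
  intro l
  induction l with
  | nil => intro c r h; simp [List.dropWhile] at h
  | cons a t ih =>
    intro c r h
    by_cases hp : p a = true
    · rw [List.dropWhile_cons_of_pos hp] at h; exact ih c r h
    · rw [List.dropWhile_cons_of_neg hp] at h
      cases h; simpa using hp

-- unfolding equation for pvDups on a cons
theorem pvDups_cons (a : Int) (t : List Int) :
    pvDups (a :: t) = if t.takeWhile (fun x => x == a) = []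
      then pvDups (t.dropWhile (fun x => x == a))
      else a :: pvDups (t.dropWhile (fun x => x == a)) := by
  simp only [pvDups]

-- run-scan on a weakly sorted list: strictly increasing output = elements occurring more than once
theorem pvDups_spec (l : List Int) (h : l.Pairwise (· ≤ ·)) :
    (pvDups l).Pairwise (· < ·) ∧ ∀ x : Int, x ∈ pvDups l ↔ 1 < l.count x := by
  induction hn : l.length using Nat.strong_induction_on generalizing l with
  | _ n ih =>
  match l, h, hn with
  | [], _, _ => simp [pvDups]
  | a :: t, h, hn =>
    have hle : ∀ y ∈ t, a ≤ y := (List.pairwise_cons.mp h).1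
    have ht : t.Pairwise (· ≤ ·) := (List.pairwise_cons.mp h).2
    have hsplit : t.takeWhile (fun x => x == a) ++ t.dropWhile (fun x => x == a) = t :=
      List.takeWhile_append_dropWhile
    have hrest : (t.dropWhile (fun x => x == a)).Pairwise (· ≤ ·) :=
      List.Pairwise.sublist (List.dropWhile_sublist _) ht
    have hrun : ∀ x ∈ t.takeWhile (fun x => x == a), x = a := by
      intro x hx
      have := List.mem_takeWhile_imp hx
      simpa using this
    have hgt : ∀ x ∈ t.dropWhile (fun x => x == a), a < x := by
      intro x hx
      cases hd : t.dropWhile (fun x => x == a) with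
      | nil => rw [hd] at hx; simp at hx
      | cons c r =>
        have hc : (c == a) = false := pvDropWhile_head_not t c r hd
        have hca : c ≠ a := by simpa using hc
        have hcmem : c ∈ t := by
          have : c ∈ t.dropWhile (fun x => x == a) := by rw [hd]; exact List.mem_cons_self ..
          exact (List.dropWhile_sublist _).mem this
        have hac : a < c := lt_of_le_of_ne (hle c hcmem) (Ne.symm hca)
        rw [hd] at hx
        rcases List.mem_cons.mp hx with rfl | hx'
        · exact hac
        · have hcle := (List.pairwise_cons.mp (hd ▸ hrest)).1 x hx'
          omega
    have hanotin : a ∉ t.dropWhile (fun x => x == a) := fun hmem => lt_irrefl a (hgt a hmem)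
    have hlen : (t.dropWhile (fun x => x == a)).length < n := by
      have := List.length_dropWhile_le (fun x => x == a) t
      simp only [List.length_cons] at hn; omega
    obtain ⟨hp, hm⟩ := ih _ hlen (t.dropWhile (fun x => x == a)) hrest rfl
    have hmemrest : ∀ x : Int, x ∈ pvDups (t.dropWhile (fun x => x == a)) →
        x ∈ t.dropWhile (fun x => x == a) := by
      intro x hx
      exact List.count_pos_iff.mp (by have := (hm x).mp hx; omega)
    have hcount_ne : ∀ x : Int, x ≠ a →
        (a :: t).count x = (t.dropWhile (fun x => x == a)).count x := by
      intro x hx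
      have h1 : (a :: t).count x = t.count x := List.count_cons_of_ne (Ne.symm hx)
      have h2 : t.count x = (t.dropWhile (fun x => x == a)).count x := by
        conv_lhs => rw [← hsplit]
        rw [List.count_append, List.count_eq_zero.mpr (fun hmem => hx (hrun x hmem))]
        omega
      exact h1.trans h2
    have hcount_a : (a :: t).count a = 1 + (t.takeWhile (fun x => x == a)).length := by
      have h2 : t.count a = (t.takeWhile (fun x => x == a)).length := by
        conv_lhs => rw [← hsplit]
        rw [List.count_append, List.count_eq_zero.mpr hanotin,
          List.count_eq_length.mpr (fun b hb => (hrun b hb).symm)]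
        omega
      rw [List.count_cons_self, h2]
      omega
    rw [pvDups_cons]
    by_cases hempty : t.takeWhile (fun x => x == a) = []
    · rw [if_pos hempty]
      refine ⟨hp, fun x => ?_⟩
      by_cases hx : x = a
      · subst hx
        constructor
        · intro hmem; exact absurd (hmemrest _ hmem) hanotin
        · intro hc; rw [hcount_a, hempty] at hc; simp at hc
      · rw [hm x, hcount_ne x hx]
    · rw [if_neg hempty]
      constructor
      · exact List.pairwise_cons.mpr ⟨fun y hy => hgt y (hmemrest y hy), hp⟩
      · intro x
        rw [List.mem_cons]
        by_cases hx : x = a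
        · subst hx
          have hlpos : 0 < (t.takeWhile (fun y => y == x)).length :=
            List.length_pos_iff.mpr hempty
          rw [hcount_a]
          exact ⟨fun _ => by omega, fun _ => Or.inl rfl⟩
        · rw [hcount_ne x hx, ← hm x]
          constructor
          · rintro (rfl | hmem)
            · exact absurd rfl hx
            · exact hmem
          · exact Or.inr

-- A's filtered counter keys: membership is 'count > 1'
theorem pvA_mem (xs : List Int) (x : Int) :
    x ∈ ((PySem.Dict.keys (PySem.Dict.counter xs)).filter
      (fun ele => decide (1 < PySem.Dict.getD (PySem.Dict.counter xs) ele 0))) ↔ 1 < xs.count x := by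
  simp only [List.mem_filter, PySem.Dict.keys_counter, PySem.Set.mem_ofList,
    PySem.Dict.getD_counter, decide_eq_true_eq]
  constructor
  · rintro ⟨-, h⟩; exact_mod_cast h
  · intro h
    exact ⟨List.count_pos_iff.mp (by omega), by exact_mod_cast h⟩

-- String.join as a left fold with an arbitrary accumulator
theorem pvJoin_fold (l : List String) (s : String) :
    l.foldl (fun a b => a ++ b) s = s ++ String.join l := by
  induction l generalizing s with
  | nil => simp [String.join]
  | cons a t ih =>
    have hj : String.join (a :: t) = a ++ String.join t := by
      show t.foldl (fun a b => a ++ b) ("" ++ a) = _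
      rw [ih ("" ++ a)]
      simp
    rw [List.foldl_cons, ih (s ++ a), hj, String.append_assoc]

-- A's foldl string building = prefix ++ join of mapped pieces
theorem pvFoldl_join (l : List Int) (acc : String) :
    l.foldl (fun acc elem => acc ++ ("<li>" ++ PySem.Int.toStr elem ++ "</li>")) acc
      = acc ++ String.join (l.map (fun elem => "<li>" ++ PySem.Int.toStr elem ++ "</li>")) := by
  rw [← List.foldl_map, pvJoin_fold]

-- ===== VERDICT (by name: the statement is the Claim_ definition above) =====
theorem more_than_one_AP_in_Channel_py_spec : Claim_equal_more_than_one_AP_in_Channel_py := by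
  intro xs _
  unfold Spec_more_than_one_AP_in_Channel_py
  obtain ⟨hpairB, hmemB⟩ := pvDups_spec (PySem.List.sorted xs (fun x => x) false)
    (PySem.List.sorted_pairwise xs (fun x => x))
  have hndB : (pvDups (PySem.List.sorted xs (fun x => x) false)).Nodup :=
    hpairB.imp (fun h => ne_of_lt h)
  have hndA : ((PySem.Dict.keys (PySem.Dict.counter xs)).filter
      (fun ele => decide (1 < PySem.Dict.getD (PySem.Dict.counter xs) ele 0))).Nodup := by
    apply List.Nodup.filter
    rw [PySem.Dict.keys_counter]
    exact PySem.Set.nodup_ofList xs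
  have hperm : (pvDups (PySem.List.sorted xs (fun x => x) false)).Perm
      ((PySem.Dict.keys (PySem.Dict.counter xs)).filter
        (fun ele => decide (1 < PySem.Dict.getD (PySem.Dict.counter xs) ele 0))) := by
    rw [List.perm_ext_iff_of_nodup hndB hndA]
    intro x
    rw [pvA_mem, hmemB x,
      (PySem.List.sorted_perm xs (fun x => x) false).count_eq x]
  have hkey : PySem.List.sorted ((PySem.Dict.keys (PySem.Dict.counter xs)).filter
      (fun ele => decide (1 < PySem.Dict.getD (PySem.Dict.counter xs) ele 0))) (fun x => x) false
      = pvDups (PySem.List.sorted xs (fun x => x) false) :=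
    PySem.List.sorted_eq_of_perm_of_pairwise_lt _ _ _ hperm hpairB
  have hs2 : PySem.List.sorted (pvDups (PySem.List.sorted xs (fun x => x) false)) (fun x => x) false
      = pvDups (PySem.List.sorted xs (fun x => x) false) :=
    PySem.List.sorted_eq_self_of_pairwise _ _ (hpairB.imp (fun h => le_of_lt h))
  show more_than_one_AP_in_Channel_py xs = more_than_one_AP_in_Channel_py_alt xs
  unfold more_than_one_AP_in_Channel_py more_than_one_AP_in_Channel_py_alt
  simp only [hkey, hs2, pvFoldl_join]
  by_cases h : pvDups (PySem.List.sorted xs (fun x => x) false) = []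
  · rw [if_pos (by rw [h]; simp), if_pos h]
  · rw [if_neg (fun hl => h (List.length_eq_zero_iff.mp (Nat.lt_one_iff.mp hl))), if_neg h,
      String.append_assoc]
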